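-- pv_equiv track=rewrite | github.com/AP-MI-2021/lab-3-bosca-fabian | main.py | digits_are_prime
-- ===== SOURCE A (Python) =====
-- def digits_are_prime(numar):
--     """
--     Functia verifica daca cifrele unui numar sunt toate prime
--     :param numar: int
--     :return: True daca este indeplinita conditia, respectiv False daca nu
--     """
--     if numar == 0:
--         return False
--     if numar < 0:
--         numar *= -1
--     while numar:
--         cifra = numar % 10
--         if cifra != 2 and cifra != 3 and cifra != 5 and cifra != 7:
--             return False
--         numar = numar // 10
--     return True
-- ===== SOURCE B (Python) =====
-- def digits_are_prime(numar):
--     return set(str(abs(numar))) <= {'2', '3', '5', '7'}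
-- ===== Notes on version B (the rewrite author's own statement) =====
-- stated objective: idiomatic
-- what changed: Replaces the arithmetic %/// digit-extraction loop with early exit by converting the number to its decimal string and doing one set-subset test against {'2','3','5','7'}.
import Mathlib
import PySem

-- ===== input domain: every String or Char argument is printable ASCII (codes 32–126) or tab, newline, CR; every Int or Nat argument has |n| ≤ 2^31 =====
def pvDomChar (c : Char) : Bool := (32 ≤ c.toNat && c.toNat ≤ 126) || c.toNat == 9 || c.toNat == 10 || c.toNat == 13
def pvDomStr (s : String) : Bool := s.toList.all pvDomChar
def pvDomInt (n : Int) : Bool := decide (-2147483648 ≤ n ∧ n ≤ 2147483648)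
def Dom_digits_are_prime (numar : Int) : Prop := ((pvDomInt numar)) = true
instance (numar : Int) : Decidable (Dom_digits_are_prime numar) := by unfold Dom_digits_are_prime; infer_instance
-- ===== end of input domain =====

-- B replaces A's %/// digit-extraction loop by a set-subset test on the decimal string of |numar| (more idiomatic, same cost).


-- ===== PORT A =====
-- 'while numar:' loop of A; only positive values reach it in A (the 'n ≤ 0' guard is
-- the loop's exit condition at 0, extended to negatives only to make the recursion total).
def pvLoopA (numar : Int) : Bool :=
  if numar ≤ 0 then true
  else
    let cifra := PySem.Int.mod numar 10
    if cifra ≠ 2 ∧ cifra ≠ 3 ∧ cifra ≠ 5 ∧ cifra ≠ 7 then false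
    else pvLoopA (PySem.Int.floordiv numar 10)
termination_by numar.toNat
decreasing_by
  simp only [PySem.Int.floordiv]
  rw [Int.fdiv_eq_ediv]; omega

def digits_are_prime (numar : Int) : Bool :=
  if numar = 0 then false
  else pvLoopA (if numar < 0 then numar * -1 else numar)

-- ===== PORT B =====
-- Source B: return set(str(abs(numar))) <= {'2', '3', '5', '7'}
def digits_are_prime_alt (numar : Int) : Bool :=
  PySem.Set.issubset (PySem.Set.ofList (PySem.Int.toStr |numar|).toList)
    (PySem.Set.ofList ['2', '3', '5', '7'])

-- ===== PRECONDITION & SPEC =====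
def Spec_digits_are_prime (numar : Int) (out : Bool) : Prop := out = digits_are_prime_alt numar
instance (numar : Int) (out : Bool) : Decidable (Spec_digits_are_prime numar out) := by unfold Spec_digits_are_prime; infer_instance

-- ===== CLAIM (what is proved, stated in full; the proofs are below) =====
def Claim_equal_digits_are_prime : Prop := ∀ (numar : Int), Dom_digits_are_prime numar → Spec_digits_are_prime numar (digits_are_prime numar)

-- ===== LEMMAS AND PROOFS =====

-- the digit-character test B performs, as a Bool predicate on one character
def pvIsP (c : Char) : Bool := (PySem.Set.ofList ['2', '3', '5', '7']).contains c

theorem pvAlt_eq_all (numar : Int) :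
    digits_are_prime_alt numar = (PySem.Int.toChars |numar|).all pvIsP := by
  unfold digits_are_prime_alt
  rw [PySem.Int.toList_toStr]
  rw [Bool.eq_iff_iff, PySem.Set.issubset_iff, List.all_eq_true]
  constructor
  · intro h c hc
    have := h c ((PySem.Set.mem_ofList _ _).mpr hc)
    simpa [pvIsP, PySem.Set.contains] using this
  · intro h c hc
    have := h c ((PySem.Set.mem_ofList _ _).mp hc)
    simpa [pvIsP, PySem.Set.contains] using this

-- one unfolding of A's loop at a positive argument
theorem pvLoopA_pos (n : Int) (h : 0 < n) :
    pvLoopA n =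
      (if PySem.Int.mod n 10 ≠ 2 ∧ PySem.Int.mod n 10 ≠ 3 ∧ PySem.Int.mod n 10 ≠ 5 ∧ PySem.Int.mod n 10 ≠ 7
       then false else pvLoopA (PySem.Int.floordiv n 10)) := by
  rw [pvLoopA]
  simp [show ¬ n ≤ 0 by omega]

-- A's per-digit test agrees with B's character test, for a digit r < 10
theorem pvDigit_eq (r : Nat) (hr : r < 10) :
    (!((r : Int) ≠ 2 ∧ (r : Int) ≠ 3 ∧ (r : Int) ≠ 5 ∧ (r : Int) ≠ 7 : Bool)) = pvIsP (Nat.digitChar r) := by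
  interval_cases r <;> decide

-- core: Nat.toDigitsCore (what B's str(abs(n)) produces) versus A's loop, for positive n
theorem pvCore (fuel : Nat) : ∀ (m : Nat) (acc : List Char), m < fuel → 0 < m →
    (Nat.toDigitsCore 10 fuel m acc).all pvIsP = (pvLoopA (m : Int) && acc.all pvIsP) := by
  induction fuel with
  | zero => intro m acc hm; omega
  | succ fuel ih =>
    intro m acc hm hpos
    have hmod : PySem.Int.mod (m : Int) 10 = ((m % 10 : Nat) : Int) := by
      simp only [PySem.Int.mod]
      rw [Int.fmod_eq_emod]; push_cast; rfl
    have hdiv : PySem.Int.floordiv (m : Int) 10 = ((m / 10 : Nat) : Int) := by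
      simp only [PySem.Int.floordiv]
      rw [Int.fdiv_eq_ediv]
      simp only [show ((0:Int) ≤ 10 ∨ (10:Int) ∣ (m:Int)) from Or.inl (by norm_num), if_pos,
        sub_zero]
      omega
    rw [pvLoopA_pos (m : Int) (by exact_mod_cast hpos), hmod, hdiv]
    have hdig := pvDigit_eq (m % 10) (Nat.mod_lt _ (by norm_num))
    simp only [Nat.toDigitsCore]
    by_cases hp : ((m % 10 : Nat) : Int) ≠ 2 ∧ ((m % 10 : Nat) : Int) ≠ 3 ∧ ((m % 10 : Nat) : Int) ≠ 5 ∧ ((m % 10 : Nat) : Int) ≠ 7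
    · have hd : pvIsP (Nat.digitChar (m % 10)) = false := by
        rw [← hdig]; simp only [Bool.not_eq_false', decide_eq_true_eq]; exact hp
      rw [if_pos hp]
      by_cases hz : m / 10 = 0
      · rw [if_pos hz]; simp [List.all_cons, hd]
      · rw [if_neg hz, ih (m / 10) _ (by omega) (by omega)]
        simp [List.all_cons, hd]
    · have hd : pvIsP (Nat.digitChar (m % 10)) = true := by
        rw [← hdig]; simp only [Bool.not_eq_true', decide_eq_false_iff_not]; exact hp
      rw [if_neg hp]
      by_cases hz : m / 10 = 0
      · rw [if_pos hz, hz]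
        simp [List.all_cons, hd, pvLoopA]
      · rw [if_neg hz, ih (m / 10) _ (by omega) (by omega)]
        simp [List.all_cons, hd]

-- ===== VERDICT (by name: the statement is the Claim_ definition above) =====
theorem digits_are_prime_spec : Claim_equal_digits_are_prime := by
  intro numar _
  unfold Spec_digits_are_prime digits_are_prime
  by_cases h0 : numar = 0
  · subst h0; decide
  · rw [if_neg h0, pvAlt_eq_all]
    have habs : |numar| = ((numar.natAbs : Nat) : Int) := Int.abs_eq_natAbs numar
    have hpos : 0 < numar.natAbs := by omega
    have hval : (if numar < 0 then numar * -1 else numar) = ((numar.natAbs : Nat) : Int) := by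
      have hm : numar * -1 = -numar := by ring
      split_ifs with h
      · rw [hm]; omega
      · omega
    rw [habs, hval]
    simp only [PySem.Int.toChars]
    rw [if_neg (show ¬ ((numar.natAbs : Nat) : Int) < 0 by omega)]
    simp only [Int.toNat_natCast]
    rw [show Nat.toDigits 10 numar.natAbs = Nat.toDigitsCore 10 (numar.natAbs + 1) numar.natAbs [] from rfl]
    rw [pvCore (numar.natAbs + 1) numar.natAbs [] (by omega) hpos]
    simp
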